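-- pv_equiv track=rewrite | github.com/victorbrambilla/aIPuzzle | Aux/FunctionsToHelp.py | bestSon
-- ===== SOURCE A (Python) =====
-- def bestSon(matriz):
--     minor = 100
--     for i in range(len(matriz)):
--         for j in range(len(matriz)):
--             if minor > matriz[i][j]:
--                 minor = matriz[i][j]
--     li_minor = []
--     for i in range(len(matriz)):
--         for j in range(len(matriz)):
--             if matriz[i][j] == minor:
--                 li_minor.append(matriz[i][j])
--     return li_minor, minor
-- ===== SOURCE B (Python) =====
-- def bestSon(matriz):
--     n = len(matriz)
--     minor = 100
--     li_minor = []
--     for i in range(n):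
--         for j in range(n):
--             v = matriz[i][j]
--             if v < minor:
--                 minor = v
--                 li_minor = [v]
--             elif v == minor:
--                 li_minor.append(v)
--     return li_minor, minor
-- ===== Notes on version B (the rewrite author's own statement) =====
-- stated objective: simpler
-- what changed: Replaces A's two full scans (one to find the minimum, one to collect its occurrences) with a single pass that keeps the running minimum and resets the occurrence list whenever a smaller value appears.
import Mathlib
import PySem

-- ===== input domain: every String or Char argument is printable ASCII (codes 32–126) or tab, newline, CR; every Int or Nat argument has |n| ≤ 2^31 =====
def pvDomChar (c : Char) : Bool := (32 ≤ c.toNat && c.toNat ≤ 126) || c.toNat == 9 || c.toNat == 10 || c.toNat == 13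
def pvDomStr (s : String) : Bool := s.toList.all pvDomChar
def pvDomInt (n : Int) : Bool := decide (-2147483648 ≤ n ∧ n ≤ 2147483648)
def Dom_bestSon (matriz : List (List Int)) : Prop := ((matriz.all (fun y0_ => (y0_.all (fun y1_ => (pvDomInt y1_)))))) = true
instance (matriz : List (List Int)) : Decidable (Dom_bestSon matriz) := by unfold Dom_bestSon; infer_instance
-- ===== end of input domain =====

-- B merges A's two scans into a single pass that keeps the running minimum and resets the occurrence list when a smaller value appears (objective: simpler).


-- ===== PORT A =====
def bestSon (matriz : List (List Int)) : List Int × Int :=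
  let n : Int := (matriz.length : Int)
  let minor : Int := (PySem.List.pyRange 0 n 1).foldl
    (fun minor i => (PySem.List.pyRange 0 n 1).foldl
      (fun minor j =>
        if minor > PySem.List.pyGetD (PySem.List.pyGetD matriz i []) j 0
        then PySem.List.pyGetD (PySem.List.pyGetD matriz i []) j 0 else minor) minor) 100
  let li_minor : List Int := (PySem.List.pyRange 0 n 1).foldl
    (fun acc i => (PySem.List.pyRange 0 n 1).foldl
      (fun acc j =>
        if PySem.List.pyGetD (PySem.List.pyGetD matriz i []) j 0 = minor
        then acc ++ [PySem.List.pyGetD (PySem.List.pyGetD matriz i []) j 0] else acc) acc) []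
  (li_minor, minor)

-- ===== PORT B =====
def bestSon_alt (matriz : List (List Int)) : List Int × Int :=
  let n : Int := (matriz.length : Int)
  (PySem.List.pyRange 0 n 1).foldl
    (fun st i => (PySem.List.pyRange 0 n 1).foldl
      (fun (st : List Int × Int) j =>
        let v := PySem.List.pyGetD (PySem.List.pyGetD matriz i []) j 0
        if v < st.2 then ([v], v)
        else if v = st.2 then (st.1 ++ [v], st.2)
        else st) st) ([], 100)

-- ===== PRECONDITION & SPEC =====
-- Pre_ excludes non-square inputs (a row shorter than the number of rows), on which Python A raises IndexError.
def Pre_bestSon (matriz : List (List Int)) : Prop :=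
  ∀ row ∈ matriz, matriz.length ≤ row.length
instance (matriz : List (List Int)) : Decidable (Pre_bestSon matriz) := by unfold Pre_bestSon; infer_instance
def pvWitness_bestSon : List (List Int) := [[3, 1], [1, 7]]

def Spec_bestSon (matriz : List (List Int)) (out : List Int × Int) : Prop := out = bestSon_alt matriz
instance (matriz : List (List Int)) (out : List Int × Int) : Decidable (Spec_bestSon matriz out) := by unfold Spec_bestSon; infer_instance

-- ===== CLAIM (what is proved, stated in full; the proofs are below) =====
def Claim_equal_bestSon : Prop := ∀ (matriz : List (List Int)), Dom_bestSon matriz → Pre_bestSon matriz → Spec_bestSon matriz (bestSon matriz)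

-- ===== LEMMAS AND PROOFS =====

-- the sequence of matrix values both programs visit, in visit order
def pvVals (matriz : List (List Int)) : List Int :=
  (PySem.List.pyRange 0 (matriz.length : Int) 1).flatMap
    (fun i => (PySem.List.pyRange 0 (matriz.length : Int) 1).map
      (fun j => PySem.List.pyGetD (PySem.List.pyGetD matriz i []) j 0))

-- a fold over a flatMap is the nested fold
theorem pv_foldl_flatMap {α β γ : Type} (l : List α) (g : α → List β) (f : γ → β → γ) (init : γ) :
    (l.flatMap g).foldl f init = l.foldl (fun acc x => (g x).foldl f acc) init := by
  induction l generalizing init with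
  | nil => rfl
  | cons x xs ih => simp [List.flatMap_cons, List.foldl_append, ih]

def pvMinStep (m v : Int) : Int := if m > v then v else m

theorem pv_minfold_le (vs : List Int) : ∀ m : Int, vs.foldl pvMinStep m ≤ m := by
  induction vs with
  | nil => intro m; simp
  | cons v vs ih =>
    intro m
    have h1 := ih (pvMinStep m v)
    have h2 : pvMinStep m v ≤ m := by unfold pvMinStep; split <;> omega
    calc (v :: vs).foldl pvMinStep m = vs.foldl pvMinStep (pvMinStep m v) := rfl
      _ ≤ pvMinStep m v := h1
      _ ≤ m := h2

-- invariant of B's one-pass loop over any value sequence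
theorem pv_onepass_inv (vs : List Int) : ∀ (m : Int) (li : List Int),
    vs.foldl (fun (st : List Int × Int) v =>
        if v < st.2 then ([v], v)
        else if v = st.2 then (st.1 ++ [v], st.2)
        else st) (li, m)
    = ((if vs.foldl pvMinStep m = m
        then li ++ vs.filter (fun v => decide (v = m))
        else vs.filter (fun v => decide (v = vs.foldl pvMinStep m))),
       vs.foldl pvMinStep m) := by
  induction vs with
  | nil => intro m li; simp
  | cons v vs ih =>
    intro m li
    have hle := pv_minfold_le vs
    by_cases h1 : v < m
    · have hstep : pvMinStep m v = v := by unfold pvMinStep; split <;> omega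
      have hM : (v :: vs).foldl pvMinStep m = vs.foldl pvMinStep v := by
        simp [List.foldl_cons, hstep]
      have hMle : vs.foldl pvMinStep v ≤ v := hle v
      have hMne : vs.foldl pvMinStep v ≠ m := by omega
      simp only [List.foldl_cons, if_pos h1, hM, ih, if_neg hMne]
      by_cases h2 : vs.foldl pvMinStep v = v
      · simp [h2]
      · have : ¬ (v = vs.foldl pvMinStep v) := fun h => h2 h.symm
        simp [h2, this]
    · have hstep : pvMinStep m v = m := by unfold pvMinStep; split <;> omega
      have hM : (v :: vs).foldl pvMinStep m = vs.foldl pvMinStep m := by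
        simp [List.foldl_cons, hstep]
      have hMle : vs.foldl pvMinStep m ≤ m := hle m
      by_cases h2 : v = m
      · simp only [List.foldl_cons, if_neg h1, if_pos h2, hM, ih]
        by_cases h3 : vs.foldl pvMinStep m = m
        · simp [h3, h2, List.append_assoc]
        · have : ¬ (v = vs.foldl pvMinStep m) := by omega
          simp [h3, this]
      · simp only [List.foldl_cons, if_neg h1, if_neg h2, hM, ih]
        by_cases h3 : vs.foldl pvMinStep m = m
        · simp [h3, h2]
        · have : ¬ (v = vs.foldl pvMinStep m) := by omega
          simp [h3, this]

theorem pv_nested {gamma : Type} (I J : List Int) (val : Int → Int → Int)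
    (f : gamma → Int → gamma) (init : gamma) :
    I.foldl (fun acc i => J.foldl (fun acc j => f acc (val i j)) acc) init
    = (I.flatMap (fun i => J.map (val i))).foldl f init := by
  rw [pv_foldl_flatMap]
  simp [List.foldl_map]

theorem pv_bestSon_eq (matriz : List (List Int)) :
    bestSon matriz
    = ((pvVals matriz).filter (fun v => decide (v = (pvVals matriz).foldl pvMinStep 100)),
       (pvVals matriz).foldl pvMinStep 100) := by
  unfold bestSon pvVals
  simp only []
  rw [pv_nested (val := fun i j => PySem.List.pyGetD (PySem.List.pyGetD matriz i []) j 0)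
      (f := fun m v => if m > v then v else m)]
  rw [pv_nested (val := fun i j => PySem.List.pyGetD (PySem.List.pyGetD matriz i []) j 0)
      (f := fun acc v => if v = ((PySem.List.pyRange 0 (matriz.length : Int) 1).flatMap
        (fun i => (PySem.List.pyRange 0 (matriz.length : Int) 1).map
          (fun j => PySem.List.pyGetD (PySem.List.pyGetD matriz i []) j 0))).foldl
            (fun m v => if m > v then v else m) 100 then acc ++ [v] else acc)]
  rw [PySem.List.foldl_append_ite_eq_filter]
  rfl

theorem pv_bestSon_alt_eq (matriz : List (List Int)) :
    bestSon_alt matriz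
    = ((pvVals matriz).filter (fun v => decide (v = (pvVals matriz).foldl pvMinStep 100)),
       (pvVals matriz).foldl pvMinStep 100) := by
  unfold bestSon_alt pvVals
  simp only []
  rw [pv_nested (val := fun i j => PySem.List.pyGetD (PySem.List.pyGetD matriz i []) j 0)
      (f := fun (st : List Int × Int) v =>
        if v < st.2 then ([v], v) else if v = st.2 then (st.1 ++ [v], st.2) else st)]
  rw [pv_onepass_inv]
  by_cases h : ((PySem.List.pyRange 0 (matriz.length : Int) 1).flatMap
      (fun i => (PySem.List.pyRange 0 (matriz.length : Int) 1).map
        (fun j => PySem.List.pyGetD (PySem.List.pyGetD matriz i []) j 0))).foldl pvMinStep 100 = 100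
  · simp [h]
  · simp [h]

-- ===== VERDICT (by name: the statement is the Claim_ definition above) =====
theorem bestSon_spec : Claim_equal_bestSon := by
  intro matriz _ _
  unfold Spec_bestSon
  rw [pv_bestSon_eq, pv_bestSon_alt_eq]
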